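-- pv_equiv track=rewrite | github.com/JoonHyeok-hozy-Kim/datastructure_and_algorithm_in_python | Contents/Part04_Recursion/part4_7_exercises.py | element_uniqueness
-- ===== SOURCE A (Python) =====
-- def element_uniqueness(S, start=None, target=None):
--     if start is None and target is None:
--         start = 0
--         target = start
--     if start == len(S):
--         return True
--     else:
--         if target == len(S):
--             return element_uniqueness(S, start+1, start+1)
--         else:
--             if S[start] == S[target] and start != target:
--                 return False
--             return element_uniqueness(S, start, target+1)
-- ===== SOURCE B (Python) =====
-- def element_uniqueness(S, start=None, target=None):
--     """Return True iff the elements of S are pairwise distinct.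
--
--     start/target optionally resume the scan from a given index pair."""
--     if start is None and target is None:
--         start = target = 0
--     n = len(S)
--     for i in range(start, n):
--         for j in range(target if i == start else i + 1, n):
--             if S[i] == S[j] and i != j:
--                 return False
--     return True
-- ===== Notes on version B (the rewrite author's own statement) =====
-- stated objective: simpler
-- what changed: Replaced A's one-comparison-per-call double-index recursion with an explicit iterative nested for-loop over index pairs; Pre_ excludes only inputs on which A raises (TypeError on mixed None/int arguments, IndexError or unbounded recursion for start/target outside the list's index range).
import Mathlib
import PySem

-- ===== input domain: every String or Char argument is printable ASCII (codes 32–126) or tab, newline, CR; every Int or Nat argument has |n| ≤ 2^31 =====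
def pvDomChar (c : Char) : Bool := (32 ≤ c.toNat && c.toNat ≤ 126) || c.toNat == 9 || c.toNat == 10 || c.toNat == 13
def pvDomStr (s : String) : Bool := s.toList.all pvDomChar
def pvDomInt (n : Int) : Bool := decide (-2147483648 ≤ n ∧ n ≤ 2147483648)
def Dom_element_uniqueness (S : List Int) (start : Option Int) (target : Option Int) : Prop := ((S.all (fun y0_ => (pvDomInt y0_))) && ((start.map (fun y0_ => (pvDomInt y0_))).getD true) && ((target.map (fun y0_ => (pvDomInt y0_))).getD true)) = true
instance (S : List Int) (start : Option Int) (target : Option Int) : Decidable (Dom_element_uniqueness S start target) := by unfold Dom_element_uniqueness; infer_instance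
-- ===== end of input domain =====

-- B replaces A's one-comparison-per-call double-index recursion with an explicit iterative
-- nested for-loop over index pairs (objective: simpler).

-- ===== PORT A =====
-- A's recursion is unbounded for out-of-range start, so the port carries a fuel parameter
-- that only makes the same computation total; under Pre_ it is never exhausted.
def euAux (S : List Int) (s t : Int) : Nat → Bool
  | 0 => true
  | fuel + 1 =>
    if s = (S.length : Int) then true
    else if t = (S.length : Int) then euAux S (s + 1) (s + 1) fuel
    else if (PySem.List.pyGet? S s == PySem.List.pyGet? S t) && decide (s ≠ t) then false
    else euAux S s (t + 1) fuel

def element_uniqueness (S : List Int) (start : Option Int) (target : Option Int) : Bool :=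
  -- Python raises TypeError on mixed None/int arguments unless start = len(S) (outside Pre_
  -- otherwise); the placeholder index S.length+1 stands for the missing argument.
  let p : Int × Int :=
    match start, target with
    | none, none => (0, 0)               -- start = 0; target = start
    | some s, some t => (s, t)
    | some s, none => (s, (S.length : Int) + 1)
    | none, some t => ((S.length : Int) + 1, t)
  euAux S p.1 p.2 ((2 * S.length + 4) * (2 * S.length + 3))

-- ===== PORT B =====
-- inner loop: 'for j in range(lo, n): if S[i] == S[j] and i != j: return False'
def euInner (S : List Int) (i lo : Int) : Bool :=
  (PySem.List.pyRange lo (S.length : Int) 1).any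
    (fun j => (PySem.List.pyGet? S i == PySem.List.pyGet? S j) && decide (i ≠ j))

-- outer loop: 'for i in range(s, n): for j in range(target if i == start else i+1, n): …'
def euLoop (S : List Int) (s t : Int) : Bool :=
  !((PySem.List.pyRange s (S.length : Int) 1).any
      (fun i => euInner S i (if i = s then t else i + 1)))

def element_uniqueness_alt (S : List Int) (start : Option Int) (target : Option Int) : Bool :=
  let p : Int × Int :=
    match start, target with
    | none, none => (0, 0)
    | some s, some t => (s, t)
    | some s, none => (s, (S.length : Int) + 1)
    | none, some t => ((S.length : Int) + 1, t)
  euLoop S p.1 p.2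

-- ===== PRECONDITION & SPEC =====
-- Pre_ admits exactly the inputs on which A returns; it excludes only inputs on which A RAISES:
-- mixed None/int arguments with start ≠ len(S) (TypeError), start or target below -len(S)
-- (IndexError, except the one returning corner start = -len(S)-1 with target = len(S), which is
-- admitted), and start or target above len(S) (unbounded recursion / IndexError).
def Pre_element_uniqueness (S : List Int) (start : Option Int) (target : Option Int) : Prop :=
  (start = none ∧ target = none) ∨
  (start ≠ none ∧ start.getD 0 = (S.length : Int)) ∨
  (start ≠ none ∧ target ≠ none ∧
    ((-(S.length : Int) ≤ start.getD 0 ∧ start.getD 0 ≤ (S.length : Int)) ∨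
      (start.getD 0 = -(S.length : Int) - 1 ∧ target.getD 0 = (S.length : Int))) ∧
    -(S.length : Int) ≤ target.getD 0 ∧ target.getD 0 ≤ (S.length : Int))

instance (S : List Int) (start : Option Int) (target : Option Int) : Decidable (Pre_element_uniqueness S start target) := by
  unfold Pre_element_uniqueness; infer_instance

def pvWitness_element_uniqueness : List Int × Option Int × Option Int := ([3, 1, 3], some 0, some 1)

def Spec_element_uniqueness (S : List Int) (start : Option Int) (target : Option Int) (out : Bool) : Prop := out = element_uniqueness_alt S start target
instance (S : List Int) (start : Option Int) (target : Option Int) (out : Bool) : Decidable (Spec_element_uniqueness S start target out) := by unfold Spec_element_uniqueness; infer_instance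

-- ===== CLAIM =====
def Claim_equal_element_uniqueness : Prop := ∀ (S : List Int) (start : Option Int) (target : Option Int), Dom_element_uniqueness S start target → Pre_element_uniqueness S start target → Spec_element_uniqueness S start target (element_uniqueness S start target)

-- ===== LEMMAS AND PROOFS =====

-- fuel that state (s,t) needs
def euNeed (S : List Int) (s t : Int) : Nat :=
  ((S.length : Int) - s).toNat * (2 * S.length + 2) + ((S.length : Int) - t).toNat + 1

theorem any_congr_mem {α : Type} (l : List α) (p q : α → Bool)
    (h : ∀ a ∈ l, p a = q a) : l.any p = l.any q := by
  induction l with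
  | nil => rfl
  | cons x xs ih =>
    simp only [List.any_cons]
    rw [h x (by simp), ih fun a ha => h a (by simp [ha])]

-- skipping the diagonal term j = i is free
theorem euInner_self (S : List Int) (i : Int) (h : i < (S.length : Int)) :
    euInner S i i = euInner S i (i + 1) := by
  rw [euInner, euInner, PySem.List.pyRange_one_cons h, List.any_cons]
  simp

theorem euLoop_done (S : List Int) (s t : Int) (h : (S.length : Int) ≤ s) :
    euLoop S s t = true := by
  rw [euLoop, PySem.List.pyRange_one_eq_nil h]
  rfl

-- finishing a row: state (s, n) equals state (s+1, s+1)
theorem euLoop_row (S : List Int) (s : Int) (h : s < (S.length : Int)) :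
    euLoop S s (S.length : Int) = euLoop S (s + 1) (s + 1) := by
  rw [euLoop, euLoop, PySem.List.pyRange_one_cons h, List.any_cons]
  have h0 : euInner S s (if s = s then (S.length : Int) else s + 1) = false := by
    rw [if_pos rfl, euInner, PySem.List.pyRange_one_eq_nil le_rfl]
    rfl
  rw [h0, Bool.false_or]
  congr 1
  apply any_congr_mem
  intro i hi
  have hmem := PySem.List.mem_pyRange_one.mp hi
  rw [if_neg (by omega)]
  by_cases hieq : i = s + 1
  · subst hieq
    rw [if_pos rfl, euInner_self S (s + 1) (by omega)]
  · rw [if_neg hieq]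

-- one comparison step: state (s, t) with t < n
theorem euLoop_step (S : List Int) (s t : Int) (hs : s < (S.length : Int))
    (ht : t < (S.length : Int)) :
    euLoop S s t =
      (if (PySem.List.pyGet? S s == PySem.List.pyGet? S t) && decide (s ≠ t) then false
       else euLoop S s (t + 1)) := by
  have hrest : ∀ u : Int,
      ((PySem.List.pyRange (s + 1) (S.length : Int) 1).any
        (fun i => euInner S i (if i = s then u else i + 1)))
      = ((PySem.List.pyRange (s + 1) (S.length : Int) 1).any
        (fun i => euInner S i (if i = s then t + 1 else i + 1))) := by
    intro u
    apply any_congr_mem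
    intro i hi
    have hmem := PySem.List.mem_pyRange_one.mp hi
    rw [if_neg (by omega), if_neg (by omega)]
  rw [euLoop, euLoop, PySem.List.pyRange_one_cons hs]
  simp only [List.any_cons, if_true]
  have hin : euInner S s t
      = (((PySem.List.pyGet? S s == PySem.List.pyGet? S t) && decide (s ≠ t)) || euInner S s (t + 1)) := by
    rw [euInner, euInner, PySem.List.pyRange_one_cons ht, List.any_cons]
  rw [hin, hrest t]
  by_cases hc : ((PySem.List.pyGet? S s == PySem.List.pyGet? S t) && decide (s ≠ t)) = true
  · rw [if_pos hc, hc]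
    simp
  · rw [if_neg hc, Bool.eq_false_iff.mpr hc, Bool.false_or]

theorem euAux_eq_loop (S : List Int) : ∀ (fuel : Nat) (s t : Int),
    -(S.length : Int) - 1 ≤ s → s ≤ (S.length : Int) →
    -(S.length : Int) ≤ t → t ≤ (S.length : Int) →
    euNeed S s t ≤ fuel → euAux S s t fuel = euLoop S s t := by
  intro fuel
  induction fuel with
  | zero =>
    intro s t _ _ _ _ hneed
    exfalso; unfold euNeed at hneed; omega
  | succ fuel ih =>
    intro s t hs0 hsn ht0 htn hneed
    by_cases hs : s = (S.length : Int)
    · rw [euAux, if_pos hs, euLoop_done S s t (le_of_eq hs.symm)]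
    · have hslt : s < (S.length : Int) := lt_of_le_of_ne hsn hs
      by_cases ht : t = (S.length : Int)
      · rw [euAux, if_neg hs, if_pos ht, ht, euLoop_row S s hslt]
        apply ih (s + 1) (s + 1) (by omega) (by omega) (by omega) (by omega)
        unfold euNeed at hneed ⊢
        have ha : ((S.length : Int) - s).toNat = ((S.length : Int) - (s + 1)).toNat + 1 := by omega
        rw [ha, Nat.succ_mul] at hneed
        have hk : ((S.length : Int) - (s + 1)).toNat ≤ 2 * S.length + 1 := by omega
        omega
      · have htlt : t < (S.length : Int) := lt_of_le_of_ne htn ht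
        rw [euAux, if_neg hs, if_neg ht, euLoop_step S s t hslt htlt]
        by_cases hc : ((PySem.List.pyGet? S s == PySem.List.pyGet? S t) && decide (s ≠ t)) = true
        · rw [if_pos hc, if_pos hc]
        · rw [if_neg hc, if_neg hc]
          apply ih s (t + 1) hs0 hsn (by omega) (by omega)
          unfold euNeed at hneed ⊢; omega

theorem euNeed_le (S : List Int) (s t : Int) (hs0 : -(S.length : Int) - 1 ≤ s)
    (ht0 : -(S.length : Int) ≤ t) :
    euNeed S s t ≤ (2 * S.length + 4) * (2 * S.length + 3) := by
  unfold euNeed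
  have ha : ((S.length : Int) - s).toNat ≤ 2 * S.length + 1 := by omega
  have hb : ((S.length : Int) - t).toNat ≤ 2 * S.length := by omega
  have h1 : ((S.length : Int) - s).toNat * (2 * S.length + 2) ≤ (2 * S.length + 1) * (2 * S.length + 2) :=
    Nat.mul_le_mul_right _ ha
  nlinarith

theorem euAux_len (S : List Int) (t : Int) : ∀ (fuel : Nat), 1 ≤ fuel →
    euAux S (S.length : Int) t fuel = true := by
  intro fuel h
  match fuel, h with
  | fuel + 1, _ => rw [euAux, if_pos rfl]

-- ===== VERDICT =====
theorem element_uniqueness_spec : Claim_equal_element_uniqueness := by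
  intro S start target _ hPre
  unfold Spec_element_uniqueness element_uniqueness element_uniqueness_alt
  rcases hPre with ⟨rfl, rfl⟩ | ⟨hs, hlen⟩ | ⟨hs, ht, h1, h3, h4⟩
  · simp only
    rw [euAux_eq_loop S _ 0 0 (by omega) (by exact_mod_cast Int.natCast_nonneg S.length)
      (by omega) (by exact_mod_cast Int.natCast_nonneg S.length)
      (euNeed_le S 0 0 (by omega) (by omega))]
  · match start, target with
    | some s, none =>
      simp only [Option.getD_some] at hlen
      subst hlen
      simp only
      rw [euAux_len S _ _ (by nlinarith), euLoop_done S _ _ le_rfl]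
    | some s, some t =>
      simp only [Option.getD_some] at hlen
      subst hlen
      simp only
      rw [euAux_len S _ _ (by nlinarith), euLoop_done S _ _ le_rfl]
  · match start, target with
    | some s, some t =>
      simp only [Option.getD_some] at h1 h3 h4
      have hsb : -(S.length : Int) - 1 ≤ s ∧ s ≤ (S.length : Int) := by
        rcases h1 with ⟨hl, hr⟩ | ⟨he, _⟩ <;> omega
      simp only
      rw [euAux_eq_loop S _ s t hsb.1 hsb.2 h3 h4 (euNeed_le S s t hsb.1 h3)]
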